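-- pv_equiv track=rewrite | github.com/goit-project/hardware-hub-utility | src/goit/classes/CheckVHDL.py | span_to_lines
-- ===== SOURCE A (Python) =====
-- def span_to_lines(span, line_pos):
--     line_first = 0
--     line_last  = 0
--
--     for i, pos in enumerate(line_pos):
--         if pos >= span[0]:
--             line_first = i + 1
--             break
--
--     for i, pos in enumerate(line_pos):
--         if not pos < span[1]:
--             line_last = i + 1
--             break
--
--     return (line_first, line_last)
-- ===== SOURCE B (Python) =====
-- def span_to_lines(span, line_pos):
--     # One pass over line_pos, tracking both answers; stop once both found.
--     first = 0
--     last = 0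
--     for i, pos in enumerate(line_pos):
--         if first == 0 and pos >= span[0]:
--             first = i + 1
--         if last == 0 and pos >= span[1]:
--             last = i + 1
--         if first and last:
--             break
--     return (first, last)
-- ===== Notes on version B (the rewrite author's own statement) =====
-- stated objective: alternative
-- what changed: B replaces A's two separate enumerate scans by a single pass that tracks both the first line reaching span[0] and the first line reaching span[1], breaking once both are found.
-- outside the precondition, e.g. on span_to_lines((), [5]): A raises IndexError, B raises IndexError
import Mathlib
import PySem

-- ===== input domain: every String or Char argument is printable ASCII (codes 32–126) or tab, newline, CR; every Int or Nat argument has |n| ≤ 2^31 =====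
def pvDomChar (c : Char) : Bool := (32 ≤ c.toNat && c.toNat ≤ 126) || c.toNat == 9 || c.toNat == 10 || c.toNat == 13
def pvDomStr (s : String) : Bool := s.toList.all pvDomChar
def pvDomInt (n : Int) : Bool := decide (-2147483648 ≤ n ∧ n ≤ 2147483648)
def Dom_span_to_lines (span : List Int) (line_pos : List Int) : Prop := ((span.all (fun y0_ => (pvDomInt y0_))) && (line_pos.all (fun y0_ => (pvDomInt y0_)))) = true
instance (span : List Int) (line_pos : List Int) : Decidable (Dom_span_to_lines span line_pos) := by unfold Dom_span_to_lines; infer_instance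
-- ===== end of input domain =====

-- ===== PORT A =====
-- B replaces A's two enumerate scans with one pass tracking both results (objective: alternative).
-- first loop of A: first index (1-based) whose pos >= s0, else 0
def loopFirst (s0 : Int) : List Int → Nat → Int
  | [], _ => 0
  | p :: rest, i => if p ≥ s0 then (i : Int) + 1 else loopFirst s0 rest (i + 1)

-- second loop of A: `if not pos < span[1]`
def loopLast (s1 : Int) : List Int → Nat → Int
  | [], _ => 0
  | p :: rest, i => if ¬ (p < s1) then (i : Int) + 1 else loopLast s1 rest (i + 1)

def span_to_lines (span : List Int) (line_pos : List Int) : List Int :=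
  let s0 := PySem.List.pyGetD span 0 0   -- span[0]; Pre_ guarantees it exists when it is read
  let s1 := PySem.List.pyGetD span 1 0   -- span[1]
  [loopFirst s0 line_pos 0, loopLast s1 line_pos 0]

-- ===== PORT B =====
-- one pass carrying both accumulators, breaking once both are nonzero
def loopBoth (s0 s1 : Int) : List Int → Nat → Int → Int → Int × Int
  | [], _, f, l => (f, l)
  | p :: rest, i, f, l =>
    let f' := if f = 0 ∧ p ≥ s0 then (i : Int) + 1 else f
    let l' := if l = 0 ∧ p ≥ s1 then (i : Int) + 1 else l
    if f' ≠ 0 ∧ l' ≠ 0 then (f', l')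
    else loopBoth s0 s1 rest (i + 1) f' l'

def span_to_lines_alt (span : List Int) (line_pos : List Int) : List Int :=
  let r := loopBoth (PySem.List.pyGetD span 0 0) (PySem.List.pyGetD span 1 0) line_pos 0 0 0
  [r.1, r.2]

-- ===== PRECONDITION & SPEC =====
-- Pre_ excludes exactly the inputs where Python A raises IndexError: span shorter
-- than 2 while line_pos is non-empty (both loops index span on their first iteration).
def Pre_span_to_lines (span : List Int) (line_pos : List Int) : Prop :=
  line_pos = [] ∨ 2 ≤ span.length
instance (span : List Int) (line_pos : List Int) : Decidable (Pre_span_to_lines span line_pos) := by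
  unfold Pre_span_to_lines; infer_instance
def pvWitness_span_to_lines : List Int × List Int := ([0, 5], [1, 3, 7])

def Spec_span_to_lines (span : List Int) (line_pos : List Int) (out : List Int) : Prop := out = span_to_lines_alt span line_pos
instance (span : List Int) (line_pos : List Int) (out : List Int) : Decidable (Spec_span_to_lines span line_pos out) := by unfold Spec_span_to_lines; infer_instance

-- ===== CLAIM (what is proved, stated in full; the proofs are below) =====
def Claim_equal_span_to_lines : Prop := ∀ (span : List Int) (line_pos : List Int), Dom_span_to_lines span line_pos → Pre_span_to_lines span line_pos → Spec_span_to_lines span line_pos (span_to_lines span line_pos)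

-- ===== LEMMAS AND PROOFS =====
lemma loopBoth_eq (s0 s1 : Int) (lp : List Int) :
    ∀ (i : Nat) (f l : Int),
      loopBoth s0 s1 lp i f l =
        ((if f = 0 then loopFirst s0 lp i else f),
         (if l = 0 then loopLast s1 lp i else l)) := by
  induction lp with
  | nil => intro i f l; simp [loopBoth, loopFirst, loopLast]
  | cons p rest ih =>
    intro i f l
    simp only [loopBoth, loopFirst, loopLast]
    by_cases hf : f = 0 <;> by_cases hl : l = 0 <;>
      by_cases h0 : p ≥ s0 <;> by_cases h1 : p < s1 <;>
      simp_all [ih] <;> omega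

-- ===== VERDICT (by name: the statement is the Claim_ definition above) =====
theorem span_to_lines_spec : Claim_equal_span_to_lines := by
  intro span line_pos _ _
  unfold Spec_span_to_lines span_to_lines span_to_lines_alt
  simp [loopBoth_eq]
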